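-- pv_equiv track=rewrite | github.com/alsk1992/instagram-ai-agent | src/instagram_ai_agent/workers/poster.py | _story_hours
-- ===== SOURCE A (Python) =====
-- def _story_hours(best_hours: list[int]) -> list[int]:
--     """Spread stories more evenly across waking hours than feed posts do."""
--     if not best_hours:
--         return [9, 12, 15, 18, 21]
--     # Fan out by ±2 hours around each best hour, dedup + clamp
--     spread: set[int] = set()
--     for h in best_hours:
--         for off in (-3, -1, 0, 1, 3):
--             candidate = (h + off) % 24
--             if 8 <= candidate <= 23:
--                 spread.add(candidate)
--     return sorted(spread)
-- ===== SOURCE B (Python) =====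
-- def _story_hours(best_hours: list[int]) -> list[int]:
--     """Spread stories more evenly across waking hours than feed posts do."""
--     if not best_hours:
--         return [9, 12, 15, 18, 21]
--     # Inverted scan: index the best hours mod 24, then walk the output range
--     # 8..23 in order and keep each hour some offset maps onto.
--     best_mod = {h % 24 for h in best_hours}
--     return [c for c in range(8, 24)
--             if any((c - off) % 24 in best_mod for off in (-3, -1, 0, 1, 3))]
-- ===== Notes on version B (the rewrite author's own statement) =====
-- stated objective: faster
-- what changed: Replaces the scatter-into-a-set-then-sort strategy by building an index set of best hours mod 24 once and scanning the already-sorted, duplicate-free output range 8..23, keeping each hour some offset maps onto, so no per-element fan-out, dedup or final sort is needed.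
import Mathlib
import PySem

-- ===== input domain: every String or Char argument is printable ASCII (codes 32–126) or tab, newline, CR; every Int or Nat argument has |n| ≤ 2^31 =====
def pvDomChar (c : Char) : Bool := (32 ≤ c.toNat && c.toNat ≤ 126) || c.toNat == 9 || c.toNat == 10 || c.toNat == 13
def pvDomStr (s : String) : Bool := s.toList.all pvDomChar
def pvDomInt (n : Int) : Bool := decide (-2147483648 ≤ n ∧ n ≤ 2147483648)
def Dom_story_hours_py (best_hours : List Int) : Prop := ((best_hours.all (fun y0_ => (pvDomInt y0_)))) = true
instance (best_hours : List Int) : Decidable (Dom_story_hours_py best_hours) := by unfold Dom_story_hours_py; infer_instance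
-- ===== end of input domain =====

-- B replaces A's scatter-into-a-set-then-sort by an inverted scan of the
-- already-ascending output range 8..23 against an index of best hours mod 24
-- (objective: alternative decomposition; no final sort or dedup needed).

-- ===== PORT A =====
def story_hours_py (best_hours : List Int) : List Int :=
  if best_hours = [] then [9, 12, 15, 18, 21]
  else
    let spread : PySem.Set Int := best_hours.foldl (fun s h =>
      ([-3, -1, 0, 1, 3] : List Int).foldl (fun s off =>
        let candidate := PySem.Int.mod (h + off) 24
        if 8 ≤ candidate ∧ candidate ≤ 23 then PySem.Set.add s candidate else s) s)
      PySem.Set.empty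
    PySem.List.sorted spread (fun x => x) false

-- ===== PORT B =====
def story_hours_py_alt (best_hours : List Int) : List Int :=
  if best_hours = [] then [9, 12, 15, 18, 21]
  else
    let best_mod : PySem.Set Int :=
      PySem.Set.ofList (best_hours.map (fun h => PySem.Int.mod h 24))
    (PySem.List.pyRange 8 24 1).filter (fun c =>
      ([-3, -1, 0, 1, 3] : List Int).any (fun off =>
        PySem.Set.contains best_mod (PySem.Int.mod (c - off) 24)))

-- ===== PRECONDITION & SPEC =====
def Spec_story_hours_py (best_hours : List Int) (out : List Int) : Prop := out = story_hours_py_alt best_hours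
instance (best_hours : List Int) (out : List Int) : Decidable (Spec_story_hours_py best_hours out) := by unfold Spec_story_hours_py; infer_instance

-- ===== CLAIM (what is proved, stated in full; the proofs are below) =====
def Claim_equal_story_hours_py : Prop := ∀ (best_hours : List Int), Dom_story_hours_py best_hours → Spec_story_hours_py best_hours (story_hours_py best_hours)

-- ===== LEMMAS AND PROOFS =====

theorem pvSet_mem_add {x y : Int} {s : PySem.Set Int} :
    x ∈ PySem.Set.add s y ↔ x = y ∨ x ∈ s := by
  simp only [PySem.Set.add, PySem.Set.contains]
  by_cases hy : y ∈ s
  · simp [hy]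
    exact fun h => h ▸ hy
  · simp [hy]
    exact Or.comm

theorem pvSet_nodup_add {y : Int} {s : PySem.Set Int} (hs : s.Nodup) :
    (PySem.Set.add s y).Nodup := by
  simp only [PySem.Set.add, PySem.Set.contains]
  by_cases hy : y ∈ s <;> simp [hy, hs, List.nodup_append]
  exact fun a ha he => hy (he ▸ ha)

-- the body of A's inner loop, named for the proofs
def pvStep (h : Int) (s : PySem.Set Int) (off : Int) : PySem.Set Int :=
  if 8 ≤ PySem.Int.mod (h + off) 24 ∧ PySem.Int.mod (h + off) 24 ≤ 23 then
    PySem.Set.add s (PySem.Int.mod (h + off) 24) else s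

theorem pvInner_mem (offs : List Int) (s : PySem.Set Int) (h x : Int) :
    x ∈ offs.foldl (pvStep h) s ↔ x ∈ s ∨
      ∃ off ∈ offs, PySem.Int.mod (h + off) 24 = x ∧ 8 ≤ x ∧ x ≤ 23 := by
  induction offs generalizing s with
  | nil => simp
  | cons o t ih =>
    simp only [List.foldl_cons, ih, List.mem_cons]
    unfold pvStep
    by_cases hc : 8 ≤ PySem.Int.mod (h + o) 24 ∧ PySem.Int.mod (h + o) 24 ≤ 23
    · simp only [if_pos hc, pvSet_mem_add]
      constructor
      · rintro ((rfl | hx) | ⟨off, ho, he⟩)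
        · exact Or.inr ⟨o, Or.inl rfl, rfl, hc⟩
        · exact Or.inl hx
        · exact Or.inr ⟨off, Or.inr ho, he⟩
      · rintro (hx | ⟨off, (rfl | ho), he⟩)
        · exact Or.inl (Or.inr hx)
        · exact Or.inl (Or.inl he.1.symm)
        · exact Or.inr ⟨off, ho, he⟩
    · simp only [if_neg hc]
      constructor
      · rintro (hx | ⟨off, ho, he⟩)
        · exact Or.inl hx
        · exact Or.inr ⟨off, Or.inr ho, he⟩
      · rintro (hx | ⟨off, (rfl | ho), he⟩)
        · exact Or.inl hx
        · exact absurd ⟨he.1 ▸ he.2.1, he.1 ▸ he.2.2⟩ hc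
        · exact Or.inr ⟨off, ho, he⟩

theorem pvInner_nodup (offs : List Int) (s : PySem.Set Int) (h : Int) (hs : s.Nodup) :
    (offs.foldl (pvStep h) s).Nodup := by
  induction offs generalizing s with
  | nil => exact hs
  | cons o t ih =>
    simp only [List.foldl_cons]
    apply ih
    unfold pvStep
    split_ifs with hc
    · exact pvSet_nodup_add hs
    · exact hs


theorem pvSpread_mem (l : List Int) (s : PySem.Set Int) (x : Int) :
    x ∈ l.foldl (fun s h => List.foldl (pvStep h) s [-3, -1, 0, 1, 3]) s ↔ x ∈ s ∨
      ∃ h ∈ l, ∃ off ∈ ([-3, -1, 0, 1, 3] : List Int),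
        PySem.Int.mod (h + off) 24 = x ∧ 8 ≤ x ∧ x ≤ 23 := by
  induction l generalizing s with
  | nil => simp
  | cons a t ih =>
    rw [List.foldl_cons, ih, pvInner_mem]
    simp only [List.mem_cons]
    constructor
    · rintro ((hx | ⟨off, ho, he⟩) | ⟨h, hh, rest⟩)
      · exact Or.inl hx
      · exact Or.inr ⟨a, Or.inl rfl, off, ho, he⟩
      · exact Or.inr ⟨h, Or.inr hh, rest⟩
    · rintro (hx | ⟨h, (rfl | hh), rest⟩)
      · exact Or.inl (Or.inl hx)
      · exact Or.inl (Or.inr rest)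
      · exact Or.inr ⟨h, hh, rest⟩

theorem pvSpread_nodup (l : List Int) (s : PySem.Set Int) (hs : s.Nodup) :
    (l.foldl (fun s h => List.foldl (pvStep h) s [-3, -1, 0, 1, 3]) s).Nodup := by
  induction l generalizing s with
  | nil => exact hs
  | cons a t ih => exact ih _ (pvInner_nodup _ _ _ hs)

theorem pvArith (h x off : Int) :
    (PySem.Int.mod (h + off) 24 = x ∧ 8 ≤ x ∧ x ≤ 23) ↔
      (8 ≤ x ∧ x < 24 ∧ PySem.Int.mod (x - off) 24 = PySem.Int.mod h 24) := by
  simp only [PySem.Int.mod_eq_emod_of_pos (b := 24) (by norm_num)]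
  omega

-- ===== VERDICT (by name: the statement is the Claim_ definition above) =====
theorem story_hours_py_spec : Claim_equal_story_hours_py := by
  intro bh _dom
  unfold Spec_story_hours_py story_hours_py story_hours_py_alt
  by_cases hbh : bh = []
  · simp [hbh]
  · simp only [if_neg hbh]
    have hstep : (fun (s : PySem.Set Int) (h : Int) =>
        ([-3, -1, 0, 1, 3] : List Int).foldl (fun s off =>
          let candidate := PySem.Int.mod (h + off) 24
          if 8 ≤ candidate ∧ candidate ≤ 23 then PySem.Set.add s candidate else s) s)
        = fun s h => List.foldl (pvStep h) s [-3, -1, 0, 1, 3] := rfl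
    rw [hstep]
    apply PySem.List.sorted_eq_of_perm_of_pairwise_lt
    · rw [List.perm_ext_iff_of_nodup (List.Nodup.filter _ (PySem.List.nodup_pyRange_one 8 24))
        (pvSpread_nodup bh PySem.Set.empty (by simp [PySem.Set.empty]))]
      intro x
      simp only [List.mem_filter, PySem.List.mem_pyRange_one, List.any_eq_true,
        PySem.Set.contains, pvSpread_mem, PySem.Set.mem_ofList, List.mem_map,
        decide_eq_true_eq, List.contains_eq_mem, PySem.Set.empty, List.not_mem_nil,
        false_or]
      constructor
      · rintro ⟨⟨h8, h24⟩, off, hoff, h, hh, hmod⟩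
        refine ⟨h, hh, off, hoff, ?_⟩
        exact (pvArith h x off).mpr ⟨h8, h24, hmod.symm⟩
      · rintro ⟨h, hh, off, hoff, he⟩
        have := (pvArith h x off).mp he
        exact ⟨⟨this.1, this.2.1⟩, off, hoff, h, hh, this.2.2.symm⟩
    · exact List.Pairwise.filter _ (PySem.List.pairwise_lt_pyRange_one 8 24)
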